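-- pv_equiv track=rewrite | github.com/zaharsayapin/CLP-ZNE | hardware-noise-mitigation/src/clp_zne/utils.py | permutation_map_of_physical_qubits
-- ===== SOURCE A (Python) =====
-- def permutation_map_of_physical_qubits(mapping_A, mapping_B, num_qubits):
--     ancillas_mapping_B = sorted(list(set(range(num_qubits))-set(mapping_B)))
--
--     permutation_map = []
--     ancilla_index = 0
--     for qubit_A in range(num_qubits):
--         if qubit_A in mapping_A:
--             virtual_qubit = mapping_A.index(qubit_A)
--             qubit_B = mapping_B[virtual_qubit]
--         else:
--             qubit_B = ancillas_mapping_B[ancilla_index]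
--             ancilla_index += 1
--         permutation_map.append((qubit_A, qubit_B))
--
--     permutation_map = dict(permutation_map)
--
--     return permutation_map
-- ===== SOURCE B (Python) =====
-- def permutation_map_of_physical_qubits(mapping_A, mapping_B, num_qubits):
--     # Staged construction: pair the two layouts virtual-index-wise, pair the two
--     # free (ancilla) qubit lists positionally, then sort the pairs by physical qubit.
--     pairs = {}
--     for a, b in zip(mapping_A, mapping_B):
--         if 0 <= a < num_qubits and a not in pairs:
--             pairs[a] = b
--     free_A = sorted(set(range(num_qubits)) - pairs.keys())
--     free_B = sorted(set(range(num_qubits)) - set(mapping_B))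
--     for a, b in zip(free_A, free_B):
--         pairs[a] = b
--     return dict(sorted(pairs.items(), key=lambda p: p[0]))
-- ===== Notes on version B (the rewrite author's own statement) =====
-- stated objective: faster
-- what changed: Instead of A's loop over range(num_qubits) with a linear membership test and mapping_A.index per qubit, B builds the pairs by zipping mapping_A with mapping_B virtual-index-wise, zipping the two sorted free-qubit lists positionally, and sorting the collected pairs by physical qubit.
import Mathlib
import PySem

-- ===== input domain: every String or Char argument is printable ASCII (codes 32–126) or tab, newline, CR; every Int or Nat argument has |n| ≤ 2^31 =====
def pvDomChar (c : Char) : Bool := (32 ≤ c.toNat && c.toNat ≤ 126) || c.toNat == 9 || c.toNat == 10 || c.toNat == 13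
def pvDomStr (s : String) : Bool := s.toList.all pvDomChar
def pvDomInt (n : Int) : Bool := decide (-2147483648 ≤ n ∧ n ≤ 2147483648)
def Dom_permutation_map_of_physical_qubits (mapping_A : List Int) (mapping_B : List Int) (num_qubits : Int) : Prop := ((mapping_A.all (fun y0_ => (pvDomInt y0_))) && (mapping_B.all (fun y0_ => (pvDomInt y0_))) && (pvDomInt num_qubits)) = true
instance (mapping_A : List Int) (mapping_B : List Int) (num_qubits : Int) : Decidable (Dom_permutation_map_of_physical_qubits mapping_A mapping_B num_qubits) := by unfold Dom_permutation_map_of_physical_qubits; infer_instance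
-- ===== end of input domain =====

-- B builds the map by staged passes — zip the two layouts virtual-index-wise, zip the two
-- sorted free-qubit lists positionally, then sort the collected pairs by physical qubit —
-- instead of A's per-qubit scan of mapping_A inside a loop over range(num_qubits).

-- ===== PORT A =====
-- the for-loop of A: builds the pair list, threading ancilla_index; none = an exception was raised
def pvALoop (mA mB anc : List Int) : List Int → Int → Option (List (Int × Int))
  | [], _ => some []
  | q :: qs, ai =>
    if mA.contains q then
      match PySem.List.index? mA q with
      | some v =>
        match PySem.List.pyGet? mB (v : Int) with
        | some b => (pvALoop mA mB anc qs ai).map (fun t => (q, b) :: t)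
        | none => none
      | none => none
    else
      match PySem.List.pyGet? anc ai with
      | some b => (pvALoop mA mB anc qs (ai + 1)).map (fun t => (q, b) :: t)
      | none => none

def permutation_map_of_physical_qubits (mapping_A : List Int) (mapping_B : List Int) (num_qubits : Int) : List (Int × Int) :=
  let ancillas_mapping_B :=
    PySem.List.sorted
      (PySem.Set.diff (PySem.Set.ofList (PySem.List.pyRange 0 num_qubits 1)) (PySem.Set.ofList mapping_B))
      (fun x => x) false
  match pvALoop mapping_A mapping_B ancillas_mapping_B (PySem.List.pyRange 0 num_qubits 1) 0 with
  | some l => (PySem.Dict.ofList l).items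
  | none => []

-- ===== PORT B =====
def permutation_map_of_physical_qubits_alt (mapping_A : List Int) (mapping_B : List Int) (num_qubits : Int) : List (Int × Int) :=
  -- 'for a, b in zip(mapping_A, mapping_B): if 0 <= a < num_qubits and a not in pairs: pairs[a] = b'
  let pairs1 :=
    (mapping_A.zip mapping_B).foldl
      (fun d p => if decide (0 ≤ p.1 ∧ p.1 < num_qubits) && !d.contains p.1 then d.insert p.1 p.2 else d)
      PySem.Dict.empty
  -- free_A = sorted(set(range(num_qubits)) - pairs.keys())
  let free_A :=
    PySem.List.sorted
      (PySem.Set.diff (PySem.Set.ofList (PySem.List.pyRange 0 num_qubits 1)) (PySem.Set.ofList pairs1.keys))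
      (fun x => x) false
  -- free_B = sorted(set(range(num_qubits)) - set(mapping_B))
  let free_B :=
    PySem.List.sorted
      (PySem.Set.diff (PySem.Set.ofList (PySem.List.pyRange 0 num_qubits 1)) (PySem.Set.ofList mapping_B))
      (fun x => x) false
  -- 'for a, b in zip(free_A, free_B): pairs[a] = b'
  let pairs2 := (free_A.zip free_B).foldl (fun d p => d.insert p.1 p.2) pairs1
  -- dict(sorted(pairs.items(), key=lambda p: p[0]))
  (PySem.Dict.ofList (PySem.List.sorted pairs2.items (fun p => p.1) false)).items

-- ===== PRECONDITION & SPEC =====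
-- Pre_ excludes exactly the inputs where A raises IndexError: a qubit of range(num_qubits)
-- whose first occurrence in mapping_A lies beyond len(mapping_B), or more missing qubits
-- than there are free slots of mapping_B (ancilla list exhausted).
def Pre_permutation_map_of_physical_qubits (mapping_A : List Int) (mapping_B : List Int) (num_qubits : Int) : Prop :=
  (∀ q ∈ mapping_A, 0 ≤ q → q < num_qubits → q ∈ mapping_A.take mapping_B.length) ∧
  ((PySem.Set.ofList mapping_B).filter (fun q => decide (0 ≤ q ∧ q < num_qubits))).length ≤
    ((PySem.Set.ofList mapping_A).filter (fun q => decide (0 ≤ q ∧ q < num_qubits))).length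
instance (mapping_A : List Int) (mapping_B : List Int) (num_qubits : Int) : Decidable (Pre_permutation_map_of_physical_qubits mapping_A mapping_B num_qubits) := by unfold Pre_permutation_map_of_physical_qubits; infer_instance

def pvWitness_permutation_map_of_physical_qubits : List Int × List Int × Int := ([2, 0, 1], [1, 2, 0], 4)

def Spec_permutation_map_of_physical_qubits (mapping_A : List Int) (mapping_B : List Int) (num_qubits : Int) (out : List (Int × Int)) : Prop := out = permutation_map_of_physical_qubits_alt mapping_A mapping_B num_qubits
instance (mapping_A : List Int) (mapping_B : List Int) (num_qubits : Int) (out : List (Int × Int)) : Decidable (Spec_permutation_map_of_physical_qubits mapping_A mapping_B num_qubits out) := by unfold Spec_permutation_map_of_physical_qubits; infer_instance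

-- ===== CLAIM (what is proved, stated in full; the proofs are below) =====
def Claim_equal_permutation_map_of_physical_qubits : Prop := ∀ (mapping_A : List Int) (mapping_B : List Int) (num_qubits : Int), Dom_permutation_map_of_physical_qubits mapping_A mapping_B num_qubits → Pre_permutation_map_of_physical_qubits mapping_A mapping_B num_qubits → Spec_permutation_map_of_physical_qubits mapping_A mapping_B num_qubits (permutation_map_of_physical_qubits mapping_A mapping_B num_qubits)

-- ===== LEMMAS AND PROOFS =====

-- proof-only middle form of A's loop: the ancilla list is consumed structurally
def pvMid (mA mB : List Int) : List Int → List Int → Option (List (Int × Int))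
  | [], _ => some []
  | q :: qs, anc =>
    if mA.contains q then
      match PySem.List.index? mA q with
      | some v =>
        match PySem.List.pyGet? mB (v : Int) with
        | some b => (pvMid mA mB qs anc).map (fun t => (q, b) :: t)
        | none => none
      | none => none
    else
      match anc with
      | b :: anc' => (pvMid mA mB qs anc').map (fun t => (q, b) :: t)
      | [] => none

-- the value A pairs with a qubit found in mapping_A
def pvVal (mA mB : List Int) (q : Int) : Option Int :=
  (PySem.List.index? mA q).bind (fun i => PySem.List.pyGet? mB (i : Int))

theorem pv_loop_eq_mid (mA mB anc : List Int) (qs : List Int) (ai : Int) (hai : 0 ≤ ai) :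
    pvALoop mA mB anc qs ai = pvMid mA mB qs (anc.drop ai.toNat) := by
  induction qs generalizing ai with
  | nil => simp [pvALoop, pvMid]
  | cons q qs ih =>
    rw [pvALoop]; simp only [pvMid]
    by_cases hq : mA.contains q = true
    · rw [if_pos hq, if_pos hq]
      cases PySem.List.index? mA q with
      | none => rfl
      | some v =>
        dsimp only
        cases PySem.List.pyGet? mB (v : Int) with
        | none => rfl
        | some b => simp [ih ai hai]
    · rw [if_neg hq, if_neg hq]
      by_cases hlt : ai.toNat < anc.length
      · rw [PySem.List.pyGet?_of_nonneg anc hai, List.drop_eq_getElem_cons hlt,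
            List.getElem?_eq_getElem hlt]
        have h1 : (ai + 1).toNat = ai.toNat + 1 := by omega
        simp [ih (ai + 1) (by omega), h1]
      · have h1 : PySem.List.pyGet? anc ai = none := by
          rw [PySem.List.pyGet?_of_nonneg anc hai, List.getElem?_eq_none]
          omega
        have h2 : anc.drop ai.toNat = [] := List.drop_eq_nil_of_le (by omega)
        rw [h1, h2]

theorem pv_mid_isSome (mA mB : List Int) (qs anc : List Int)
    (h1 : ∀ q ∈ qs, mA.contains q = true → ∃ b, pvVal mA mB q = some b)
    (h2 : (qs.filter (fun q => !mA.contains q)).length ≤ anc.length) :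
    ∃ l, pvMid mA mB qs anc = some l := by
  induction qs generalizing anc with
  | nil => exact ⟨[], rfl⟩
  | cons q qs ih =>
    simp only [pvMid]
    by_cases hq : mA.contains q = true
    · rw [if_pos hq]
      obtain ⟨b, hb⟩ := h1 q (by simp) hq
      unfold pvVal at hb
      rw [show (PySem.List.index? mA q) = (PySem.List.index? mA q) from rfl]
      cases hi : PySem.List.index? mA q with
      | none => rw [hi] at hb; simp at hb
      | some i =>
        rw [hi] at hb
        simp only [Option.bind_some] at hb
        dsimp only
        rw [hb]
        obtain ⟨l, hl⟩ := ih anc (fun r hr hm => h1 r (by simp [hr]) hm)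
          (by have hqm : q ∈ mA := by simpa using hq
              simpa [List.filter_cons, hqm] using h2)
        exact ⟨(q, b) :: l, by dsimp only; rw [hl]; rfl⟩
    · rw [if_neg hq]
      cases anc with
      | nil =>
        have hqm : q ∉ mA := by simpa using hq
        simp [hqm] at h2
      | cons b anc' =>
        obtain ⟨l, hl⟩ := ih anc' (fun r hr hm => h1 r (by simp [hr]) hm)
          (by have hqm : q ∉ mA := by simpa using hq
              simp [hqm] at h2 ⊢; omega)
        exact ⟨(q, b) :: l, by dsimp only; rw [hl]; rfl⟩

theorem pv_mid_map_fst (mA mB : List Int) (qs anc : List Int) (l : List (Int × Int))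
    (h : pvMid mA mB qs anc = some l) : l.map Prod.fst = qs := by
  induction qs generalizing anc l with
  | nil => simp [pvMid] at h; simp [← h]
  | cons q qs ih =>
    simp only [pvMid] at h
    by_cases hq : mA.contains q = true
    · rw [if_pos hq] at h
      cases hi : PySem.List.index? mA q with
      | none => simp only [hi] at h; exact absurd h (by simp)
      | some i =>
        simp only [hi] at h
        cases hg : PySem.List.pyGet? mB (i : Int) with
        | none => simp only [hg] at h; exact absurd h (by simp)
        | some b =>
          simp only [hg] at h
          cases hm : pvMid mA mB qs anc with
          | none => simp only [hm] at h; exact absurd h (by simp)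
          | some l' =>
            simp only [hm] at h
            simp only [Option.map_some, Option.some.injEq] at h
            subst h
            simp [ih anc l' hm]
    · rw [if_neg hq] at h
      cases anc with
      | nil => exact absurd h (by simp)
      | cons b anc' =>
        cases hm : pvMid mA mB qs anc' with
        | none => simp only [hm] at h; exact absurd h (by simp)
        | some l' =>
          simp only [hm] at h
          simp only [Option.map_some, Option.some.injEq] at h
          subst h
          simp [ih anc' l' hm]

theorem pv_mid_mem (mA mB : List Int) (qs anc : List Int) (l : List (Int × Int))
    (h : pvMid mA mB qs anc = some l) (a b : Int) :
    (a, b) ∈ l ↔ (a ∈ qs ∧ pvVal mA mB a = some b) ∨ (a, b) ∈ (qs.filter (fun q => !mA.contains q)).zip anc := by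
  induction qs generalizing anc l with
  | nil => simp [pvMid] at h; simp [← h]
  | cons q qs ih =>
    simp only [pvMid] at h
    by_cases hq : mA.contains q = true
    · have hqm : q ∈ mA := by simpa using hq
      rw [if_pos hq] at h
      cases hi : PySem.List.index? mA q with
      | none => simp only [hi] at h; exact absurd h (by simp)
      | some i =>
        simp only [hi] at h
        cases hg : PySem.List.pyGet? mB (i : Int) with
        | none => simp only [hg] at h; exact absurd h (by simp)
        | some v =>
          simp only [hg] at h
          cases hm : pvMid mA mB qs anc with
          | none => simp only [hm] at h; exact absurd h (by simp)
          | some l' =>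
            simp only [hm] at h
            simp only [Option.map_some, Option.some.injEq] at h
            subst h
            have hval : pvVal mA mB q = some v := by
              simp only [pvVal, hi, Option.bind_some]; exact hg
            rw [List.filter_cons_of_neg (by simp [hqm])]
            constructor
            · intro hmem
              rcases List.mem_cons.1 hmem with he | hmem
              · rw [Prod.mk.injEq] at he
                exact Or.inl ⟨by simp [he.1], by rw [he.1, hval, he.2]⟩
              · rcases (ih anc l' hm).1 hmem with ⟨hin, hv⟩ | hz
                · exact Or.inl ⟨by simp [hin], hv⟩
                · exact Or.inr hz
            · rintro (⟨hin, hv⟩ | hz)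
              · rcases List.mem_cons.1 hin with rfl | hin
                · rw [hval] at hv
                  simp only [Option.some.injEq] at hv
                  simp [hv]
                · exact List.mem_cons_of_mem _ ((ih anc l' hm).2 (Or.inl ⟨hin, hv⟩))
              · exact List.mem_cons_of_mem _ ((ih anc l' hm).2 (Or.inr hz))
    · have hqm : q ∉ mA := by simpa using hq
      rw [if_neg hq] at h
      cases anc with
      | nil => exact absurd h (by simp)
      | cons c anc' =>
        cases hm : pvMid mA mB qs anc' with
        | none => simp only [hm] at h; exact absurd h (by simp)
        | some l' =>
          simp only [hm] at h
          simp only [Option.map_some, Option.some.injEq] at h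
          subst h
          have hnoval : pvVal mA mB q = none := by
            simp only [pvVal, (PySem.List.index?_eq_none_iff mA q).2 hqm]
            rfl
          rw [List.filter_cons_of_pos (by simp [hqm]), List.zip_cons_cons]
          constructor
          · intro hmem
            rcases List.mem_cons.1 hmem with he | hmem
            · rw [Prod.mk.injEq] at he
              exact Or.inr (by simp [he.1, he.2])
            · rcases (ih anc' l' hm).1 hmem with ⟨hin, hv⟩ | hz
              · exact Or.inl ⟨by simp [hin], hv⟩
              · exact Or.inr (List.mem_cons_of_mem _ hz)
          · rintro (⟨hin, hv⟩ | hz)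
            · rcases List.mem_cons.1 hin with rfl | hin
              · rw [hnoval] at hv; exact absurd hv (by simp)
              · exact List.mem_cons_of_mem _ ((ih anc' l' hm).2 (Or.inl ⟨hin, hv⟩))
            · rcases List.mem_cons.1 hz with he | hz
              · rw [Prod.mk.injEq] at he
                simp [he.1, he.2]
              · exact List.mem_cons_of_mem _ ((ih anc' l' hm).2 (Or.inr hz))

-- B's first loop as a dictionary lookup: a key is stored iff it is in range and
-- first occurs in the zip; the stored value is the zip's first match
theorem pv_dict1_get?_aux (n : Int) (zl : List (Int × Int)) (d : PySem.Dict Int Int) (q : Int) :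
    ((zl.foldl (fun d p => if decide (0 ≤ p.1 ∧ p.1 < n) && !d.contains p.1 then d.insert p.1 p.2 else d) d).get? q)
    = match d.get? q with
      | some v => some v
      | none => if 0 ≤ q ∧ q < n then zl.lookup q else none := by
  induction zl generalizing d with
  | nil => cases hg : d.get? q <;> simp [hg]
  | cons p zl ih =>
    obtain ⟨a, b⟩ := p
    simp only [List.foldl_cons]
    by_cases hc : (decide (0 ≤ a ∧ a < n) && !d.contains a) = true
    · rw [if_pos hc, ih]
      simp only [Bool.and_eq_true, Bool.not_eq_true', decide_eq_true_eq] at hc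
      obtain ⟨hr, hnc⟩ := hc
      have hdq : d.get? a = none := by
        rw [PySem.Dict.contains_eq_isSome_get?] at hnc
        simpa using hnc
      by_cases hqa : q = a
      · subst hqa
        rw [PySem.Dict.get?_insert_self, hdq]
        simp [hr]
      · rw [PySem.Dict.get?_insert_of_ne _ _ hqa]
        cases hg : d.get? q with
        | none =>
          have hba : (q == a) = false := by simpa using hqa
          simp [List.lookup, hba]
        | some v => simp
    · rw [if_neg hc, ih]
      cases hg : d.get? q with
      | some v => simp
      | none =>
        by_cases hqa : q = a
        · subst hqa
          simp only [Bool.and_eq_true, Bool.not_eq_true', decide_eq_true_eq, not_and_or] at hc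
          rcases hc with hnr | hcon
          · have hnr' : ¬(0 ≤ q ∧ q < n) := by tauto
            rw [if_neg hnr', if_neg hnr']
          · have hct : d.contains q = true := by
              cases hcb : d.contains q
              · exact absurd hcb hcon
              · rfl
            rw [PySem.Dict.contains_eq_isSome_get?, hg] at hct
            simp at hct
        · have hba : (q == a) = false := by simpa using hqa
          simp [List.lookup, hba]

theorem pv_lookup_zip_of_index? (mA mB : List Int) (q : Int) (i : Nat)
    (hi : PySem.List.index? mA q = some i) (hlt : i < mB.length) :
    (mA.zip mB).lookup q = mB[i]? := by
  induction mA generalizing mB i with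
  | nil => rw [PySem.List.index?_eq_idxOf?] at hi; simp at hi
  | cons x t ih =>
    by_cases hx : x = q
    · subst hx
      rw [PySem.List.index?_cons_self] at hi
      have hi0 : i = 0 := by simpa using hi.symm
      subst hi0
      cases mB with
      | nil => simp at hlt
      | cons b mB' => simp [List.lookup]
    · rw [PySem.List.index?_cons_of_ne t hx] at hi
      cases hj : PySem.List.index? t q with
      | none => rw [hj] at hi; simp at hi
      | some j =>
        rw [hj] at hi
        simp only [Option.map_some, Option.some.injEq] at hi
        subst hi
        cases mB with
        | nil => simp at hlt
        | cons b mB' =>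
          have hba : (q == x) = false := by
            simp only [beq_eq_false_iff_ne, ne_eq]
            exact fun h => hx h.symm
          simp only [List.zip_cons_cons, List.lookup, hba]
          simpa using ih mB' j hj (by simpa using hlt)

theorem pv_lookup_zip_none (mA mB : List Int) (q : Int) (hq : q ∉ mA) :
    (mA.zip mB).lookup q = none := by
  induction mA generalizing mB with
  | nil => simp
  | cons x t ih =>
    cases mB with
    | nil => simp
    | cons b mB' =>
      have hx : x ≠ q := fun h => hq (by simp [h])
      have hba : (q == x) = false := by
        simp only [beq_eq_false_iff_ne, ne_eq]
        exact fun h => hx h.symm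
      simp only [List.zip_cons_cons, List.lookup, hba]
      exact ih mB' (fun h => hq (List.mem_cons_of_mem _ h))

theorem pv_nodup_keys_dict1 (n : Int) (zl : List (Int × Int)) (d : PySem.Dict Int Int)
    (hd : d.keys.Nodup) :
    ((zl.foldl (fun d p => if decide (0 ≤ p.1 ∧ p.1 < n) && !d.contains p.1 then d.insert p.1 p.2 else d) d).keys).Nodup := by
  induction zl generalizing d with
  | nil => simpa using hd
  | cons p zl ih =>
    simp only [List.foldl_cons]
    by_cases hc : (decide (0 ≤ p.1 ∧ p.1 < n) && !d.contains p.1) = true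
    · rw [if_pos hc]
      exact ih _ (PySem.Dict.nodup_keys_insert d p.1 p.2 hd)
    · rw [if_neg hc]
      exact ih _ hd

-- A's sorted set difference is the ascending filtered range
theorem pv_sorted_filter_range (n : Int) (t : List Int) :
    PySem.List.sorted ((PySem.List.pyRange 0 n 1).filter (fun q => !t.contains q)) (fun x => x) false
    = (PySem.List.pyRange 0 n 1).filter (fun q => !t.contains q) := by
  exact PySem.List.sorted_eq_self_of_pairwise _ _
    (((PySem.List.pairwise_lt_pyRange_one 0 n).filter _).imp le_of_lt)

-- under Pre_, each in-range qubit of mapping_A has its first occurrence within the zip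
theorem pv_hidx (mA mB : List Int) (n : Int)
    (hpre1 : ∀ q ∈ mA, 0 ≤ q → q < n → q ∈ mA.take mB.length) :
    ∀ q : Int, q ∈ mA → 0 ≤ q → q < n → ∃ i, PySem.List.index? mA q = some i ∧ i < mB.length := by
  intro q hqA hq0 hqn
  have htake := hpre1 q hqA hq0 hqn
  obtain ⟨i, hi⟩ := Option.isSome_iff_exists.1 ((PySem.List.index?_isSome_iff mA q).2 hqA)
  refine ⟨i, hi, ?_⟩
  obtain ⟨hilen, hgi, hmin⟩ := PySem.List.getElem_of_index?_eq_some hi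
  obtain ⟨j, hj, hje⟩ := List.mem_iff_getElem.1 htake
  by_contra hge
  rw [Nat.not_lt] at hge
  have hjm : j < mB.length := lt_of_lt_of_le hj (by simp [List.length_take])
  have hja : j < mA.length := lt_of_lt_of_le hj (by simp [List.length_take])
  have : mA[j] = q := by rw [← List.getElem_take (h := hj)]; exact hje
  exact hmin j (lt_of_lt_of_le hjm hge) this

-- the distinct in-range elements of xs, counted on either side
theorem pv_filter_range_count (n : Int) (xs : List Int) :
    ((PySem.Set.ofList xs).filter (fun q => decide (0 ≤ q ∧ q < n))).length
    = ((PySem.List.pyRange 0 n 1).filter (fun q => xs.contains q)).length := by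
  apply List.Perm.length_eq
  apply (List.perm_ext_iff_of_nodup ((PySem.Set.nodup_ofList xs).filter _)
    ((PySem.List.nodup_pyRange_one 0 n).filter _)).2
  intro a
  simp only [List.mem_filter, PySem.Set.mem_ofList, PySem.List.mem_pyRange_one,
    decide_eq_true_eq, List.contains_iff_mem]
  tauto

-- ===== VERDICT (by name: the statement is the Claim_ definition above) =====
theorem permutation_map_of_physical_qubits_spec : Claim_equal_permutation_map_of_physical_qubits := by
  intro mA mB n _ hpre
  obtain ⟨hpre1, hpre2⟩ := hpre
  unfold Spec_permutation_map_of_physical_qubits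
  unfold permutation_map_of_physical_qubits permutation_map_of_physical_qubits_alt
  have hidx := pv_hidx mA mB n hpre1
  have hRnd := PySem.List.nodup_pyRange_one 0 n
  have hofR : PySem.Set.ofList (PySem.List.pyRange 0 n 1) = PySem.List.pyRange 0 n 1 :=
    PySem.Set.ofList_eq_self_of_nodup _ hRnd
  -- A's ancilla list is the ascending filtered range
  have hancB : PySem.List.sorted
      (PySem.Set.diff (PySem.Set.ofList (PySem.List.pyRange 0 n 1)) (PySem.Set.ofList mB))
      (fun x => x) false
      = (PySem.List.pyRange 0 n 1).filter (fun q => !mB.contains q) := by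
    rw [hofR]
    have hdiff : PySem.Set.diff (PySem.List.pyRange 0 n 1) (PySem.Set.ofList mB)
        = (PySem.List.pyRange 0 n 1).filter (fun q => !(PySem.Set.ofList mB).contains q) := rfl
    have hflt : List.filter (fun q => !(PySem.Set.ofList mB).contains q) (PySem.List.pyRange 0 n 1)
        = List.filter (fun q => !mB.contains q) (PySem.List.pyRange 0 n 1) :=
      List.filter_congr (fun q _ => by
        by_cases h : q ∈ mB <;> simp [h, PySem.Set.mem_ofList])
    rw [hdiff, hflt]
    exact pv_sorted_filter_range n mB
  dsimp only
  rw [hancB]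
  -- A's loop in structural form, ancillas consumed from the front
  rw [pv_loop_eq_mid mA mB _ _ 0 le_rfl]
  simp only [Int.toNat_zero, List.drop_zero]
  -- the loop succeeds under Pre_
  have h1 : ∀ q ∈ PySem.List.pyRange 0 n 1, mA.contains q = true → ∃ b, pvVal mA mB q = some b := by
    intro q hqR hqc
    have hqA : q ∈ mA := by simpa using hqc
    have hr : 0 ≤ q ∧ q < n := by simpa using (PySem.List.mem_pyRange_one).1 hqR
    obtain ⟨i, hi, hilt⟩ := hidx q hqA hr.1 hr.2
    refine ⟨mB[i], ?_⟩
    simp only [pvVal, hi, Option.bind_some]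
    rw [PySem.List.pyGet?_of_nonneg mB (by exact_mod_cast Int.natCast_nonneg i)]
    simp [hilt]
  have h2 : ((PySem.List.pyRange 0 n 1).filter (fun q => !mA.contains q)).length
      ≤ ((PySem.List.pyRange 0 n 1).filter (fun q => !mB.contains q)).length := by
    have hA := List.length_eq_length_filter_add (l := PySem.List.pyRange 0 n 1) (fun q => mA.contains q)
    have hB := List.length_eq_length_filter_add (l := PySem.List.pyRange 0 n 1) (fun q => mB.contains q)
    rw [pv_filter_range_count n mA, pv_filter_range_count n mB] at hpre2
    omega
  obtain ⟨l, hl⟩ := pv_mid_isSome mA mB (PySem.List.pyRange 0 n 1) ((PySem.List.pyRange 0 n 1).filter (fun q => !mB.contains q)) h1 h2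
  rw [hl]
  dsimp only
  have hlfst : l.map Prod.fst = PySem.List.pyRange 0 n 1 := pv_mid_map_fst _ _ _ _ _ hl
  have hlnd : l.Nodup := List.Nodup.of_map Prod.fst (by rw [hlfst]; exact hRnd)
  -- dict(pairs-with-distinct-keys) keeps exactly the pair list
  have hofl_items : ∀ (t : List (Int × Int)), (t.map Prod.fst).Nodup → (PySem.Dict.ofList t).items = t := by
    intro t hnd
    have hof : PySem.Dict.ofList t = t.foldl (fun d p => d.insert p.1 p.2) PySem.Dict.empty := rfl
    rw [hof, PySem.Dict.items_foldl_insert_fresh t Prod.fst Prod.snd PySem.Dict.empty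
      (fun a _ => by simp [PySem.Dict.contains_empty]) hnd]
    have he : (PySem.Dict.empty : PySem.Dict Int Int).items = [] := rfl
    simp [he]
  -- B's first dictionary
  set d1 : PySem.Dict Int Int :=
    (mA.zip mB).foldl
      (fun d p => if decide (0 ≤ p.1 ∧ p.1 < n) && !d.contains p.1 then d.insert p.1 p.2 else d)
      PySem.Dict.empty with hd1
  have hget1 : ∀ q : Int, d1.get? q = if 0 ≤ q ∧ q < n then (mA.zip mB).lookup q else none := by
    intro q
    rw [hd1, pv_dict1_get?_aux]
    simp [PySem.Dict.get?_empty]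
  have hkeys1nd : d1.keys.Nodup := by
    rw [hd1]; exact pv_nodup_keys_dict1 n _ _ PySem.Dict.nodup_keys_empty
  have hmemk1 : ∀ q : Int, q ∈ d1.keys ↔ ((0 ≤ q ∧ q < n) ∧ q ∈ mA) := by
    intro q
    constructor
    · intro hk
      have hne : d1.get? q ≠ none := fun he => ((PySem.Dict.get?_eq_none_iff_not_mem_keys d1 q).1 he) hk
      rw [hget1 q] at hne
      by_cases hr : 0 ≤ q ∧ q < n
      · rw [if_pos hr] at hne
        refine ⟨hr, ?_⟩
        by_contra hqa
        exact hne (pv_lookup_zip_none mA mB q hqa)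
      · rw [if_neg hr] at hne
        exact absurd rfl hne
    · rintro ⟨hr, hqa⟩
      obtain ⟨i, hi, hilt⟩ := hidx q hqa hr.1 hr.2
      have hsome : d1.get? q = some mB[i] := by
        rw [hget1 q, if_pos hr, pv_lookup_zip_of_index? mA mB q i hi hilt]
        simp [hilt]
      have hc : d1.contains q = true := by
        rw [PySem.Dict.contains_eq_isSome_get?, hsome]
        rfl
      exact (PySem.Dict.contains_iff_mem_keys d1 q).1 hc
  -- B's free_A is A's ascending missing-qubit list
  have hfA : PySem.List.sorted
      (PySem.Set.diff (PySem.Set.ofList (PySem.List.pyRange 0 n 1)) (PySem.Set.ofList d1.keys))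
      (fun x => x) false
      = (PySem.List.pyRange 0 n 1).filter (fun q => !mA.contains q) := by
    rw [hofR]
    have hdiff : PySem.Set.diff (PySem.List.pyRange 0 n 1) (PySem.Set.ofList d1.keys)
        = (PySem.List.pyRange 0 n 1).filter (fun q => !(PySem.Set.ofList d1.keys).contains q) := rfl
    have hflt : (PySem.List.pyRange 0 n 1).filter (fun q => !(PySem.Set.ofList d1.keys).contains q)
        = (PySem.List.pyRange 0 n 1).filter (fun q => !mA.contains q) :=
      List.filter_congr (fun q hq => by
        have hr : 0 ≤ q ∧ q < n := by simpa using (PySem.List.mem_pyRange_one).1 hq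
        by_cases h : q ∈ mA
        · simp [PySem.Set.mem_ofList, (hmemk1 q).2 ⟨hr, h⟩, h]
        · have hnk : q ∉ d1.keys := fun hk => h ((hmemk1 q).1 hk).2
          simp [PySem.Set.mem_ofList, hnk, h])
    rw [hdiff, hflt]
    exact pv_sorted_filter_range n mA
  rw [hfA]
  set fA : List Int := (PySem.List.pyRange 0 n 1).filter (fun q => !mA.contains q) with hfAdef
  set fB : List Int := (PySem.List.pyRange 0 n 1).filter (fun q => !mB.contains q) with hfBdef
  have hfAnd : fA.Nodup := hRnd.filter _
  have hmapfst : (fA.zip fB).map Prod.fst = fA := List.map_fst_zip h2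
  -- the second loop inserts only fresh keys, so it appends
  have hfresh : ∀ p ∈ fA.zip fB, d1.contains p.1 = false := by
    rintro ⟨a, b⟩ hp
    have haA : a ∈ fA := (List.of_mem_zip hp).1
    have hnotA : a ∉ mA := by
      have := (List.mem_filter.1 haA).2
      simpa using this
    cases hcb : d1.contains a with
    | false => rfl
    | true => exact absurd (((hmemk1 a).1 ((PySem.Dict.contains_iff_mem_keys d1 a).1 hcb)).2) hnotA
  have hitems2 : ((fA.zip fB).foldl (fun d p => d.insert p.1 p.2) d1).items
      = d1.items ++ fA.zip fB := by
    rw [PySem.Dict.items_foldl_insert_fresh (fA.zip fB) Prod.fst Prod.snd d1 hfresh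
      (by rw [hmapfst]; exact hfAnd)]
    simp
  rw [hitems2]
  -- the combined pair list is a rearrangement of A's output
  have hitems1nd : d1.items.Nodup := by
    refine List.Nodup.of_map (fun p => p.1) ?_
    have : d1.items.map (fun p => p.1) = d1.keys := rfl
    rw [this]
    exact hkeys1nd
  have hzipnd : (fA.zip fB).Nodup := List.Nodup.of_map Prod.fst (by rw [hmapfst]; exact hfAnd)
  have hnd2 : (d1.items ++ fA.zip fB).Nodup := by
    refine List.Nodup.append hitems1nd hzipnd ?_
    rintro ⟨a, b⟩ hp hq
    have hak : a ∈ d1.keys := by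
      have : a ∈ d1.items.map (fun p => p.1) := List.mem_map.2 ⟨(a, b), hp, rfl⟩
      exact this
    have haA : a ∈ mA := ((hmemk1 a).1 hak).2
    have : a ∉ mA := by
      have := (List.mem_filter.1 (List.of_mem_zip hq).1).2
      simpa using this
    exact this haA
  -- matching values: A's looked-up value is B's first-pass dictionary entry
  have hval_iff : ∀ a b : Int, (a ∈ PySem.List.pyRange 0 n 1 ∧ pvVal mA mB a = some b) ↔ (a, b) ∈ d1.items := by
    intro a b
    constructor
    · rintro ⟨haR, hv⟩
      have hr : 0 ≤ a ∧ a < n := by simpa using (PySem.List.mem_pyRange_one).1 haR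
      obtain ⟨i, hi⟩ : ∃ i, PySem.List.index? mA a = some i := by
        unfold pvVal at hv
        cases hio : PySem.List.index? mA a with
        | none => rw [hio] at hv; simp at hv
        | some i => exact ⟨i, rfl⟩
      have haA : a ∈ mA := (PySem.List.index?_isSome_iff mA a).1 (by rw [hi]; rfl)
      obtain ⟨i', hi', hilt⟩ := hidx a haA hr.1 hr.2
      rw [hi] at hi'
      have hii : i = i' := by simpa using hi'
      subst hii
      have hvb : mB[i]? = some b := by
        unfold pvVal at hv
        rw [hi, Option.bind_some,
          PySem.List.pyGet?_of_nonneg mB (by exact_mod_cast Int.natCast_nonneg i)] at hv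
        simpa using hv
      refine (PySem.Dict.get?_eq_some_iff_mem_items d1 a b hkeys1nd).1 ?_
      rw [hget1 a, if_pos hr, pv_lookup_zip_of_index? mA mB a i hi hilt]
      exact hvb
    · intro hp
      have hsome : d1.get? a = some b := PySem.Dict.get?_of_mem_items d1 hp hkeys1nd
      rw [hget1 a] at hsome
      by_cases hr : 0 ≤ a ∧ a < n
      · rw [if_pos hr] at hsome
        have haA : a ∈ mA := by
          by_contra hna
          rw [pv_lookup_zip_none mA mB a hna] at hsome
          exact absurd hsome (by simp)
        obtain ⟨i, hi, hilt⟩ := hidx a haA hr.1 hr.2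
        rw [pv_lookup_zip_of_index? mA mB a i hi hilt] at hsome
        refine ⟨(PySem.List.mem_pyRange_one).2 (by simpa using hr), ?_⟩
        simp only [pvVal, hi, Option.bind_some]
        rw [PySem.List.pyGet?_of_nonneg mB (by exact_mod_cast Int.natCast_nonneg i)]
        simpa using hsome
      · rw [if_neg hr] at hsome
        exact absurd hsome (by simp)
  have hmem2 : ∀ p : Int × Int, p ∈ l ↔ p ∈ d1.items ++ fA.zip fB := by
    rintro ⟨a, b⟩
    rw [pv_mid_mem mA mB _ _ l hl a b, List.mem_append]
    exact or_congr (hval_iff a b) Iff.rfl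
  have hperm : l.Perm (d1.items ++ fA.zip fB) := (List.perm_ext_iff_of_nodup hlnd hnd2).2 hmem2
  have hpw : l.Pairwise (fun p q : Int × Int => p.1 < q.1) := by
    have hr := PySem.List.pairwise_lt_pyRange_one 0 n
    rw [← hlfst] at hr
    exact List.pairwise_map.1 hr
  rw [PySem.List.sorted_eq_of_perm_of_pairwise_lt _ l (fun p => p.1) hperm hpw]
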